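-- pv_equiv track=rewrite | github.com/Alfred1109/xuanxuestructural | fix_tables_v2.py | fix_markdown_tables
-- ===== SOURCE A (Python) =====
-- def fix_markdown_tables(content):
--     """修复Markdown表格：移除表格内的空行，确保表格前后有空行"""
--     lines = content.split('\n')
--     fixed_lines = []
--     table_buffer = []
--     in_table = False
--
--     for i, line in enumerate(lines):
--         stripped = line.strip()
--
--         # 检查是否是表格行
--         is_table_line = stripped.startswith('|') and '|' in stripped
--
--         if is_table_line:
--             # 收集表格行
--             table_buffer.append(line)
--             in_table = True
--         else:
--             # 非表格行
--             if in_table: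
--                 # 表格结束，输出收集的表格
--                 # 确保表格前有空行
--                 if fixed_lines and fixed_lines[-1].strip() != '':
--                     fixed_lines.append('')
--
--                 # 输出表格（所有行连续，无空行）
--                 fixed_lines.extend(table_buffer)
--
--                 # 确保表格后有空行（如果当前行不是空行）
--                 if stripped != '':
--                     fixed_lines.append('')
--
--                 # 重置
--                 table_buffer = []
--                 in_table = False
--
--             # 添加当前非表格行
--             fixed_lines.append(line)
--
--     # 处理文件末尾的表格
--     if table_buffer:
--         if fixed_lines and fixed_lines[-1].strip() != '':
--             fixed_lines.append('')
--         fixed_lines.extend(table_buffer)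
--
--     return '\n'.join(fixed_lines)
-- ===== SOURCE B (Python) =====
-- from itertools import groupby
--
--
-- def fix_markdown_tables(content):
--     """修复Markdown表格：移除表格内的空行，确保表格前后有空行"""
--     fixed = []
--     prev_table = False
--     for is_table, grp in groupby(content.split('\n'),
--                                  key=lambda l: l.strip().startswith('|')):
--         block = list(grp)
--         if is_table:
--             if fixed and fixed[-1].strip() != '':
--                 fixed.append('')
--         else:
--             if prev_table and block[0].strip() != '':
--                 fixed.append('')
--         fixed.extend(block)
--         prev_table = is_table
--     return '\n'.join(fixed)
-- ===== Notes on version B (the rewrite author's own statement) =====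
-- stated objective: alternative
-- what changed: A's per-line state machine with an in_table flag and a table buffer is replaced by segmenting the lines into itertools.groupby blocks keyed by whether the stripped line begins with a pipe character, then traversing the block list and padding blank lines at block boundaries.
import Mathlib
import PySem

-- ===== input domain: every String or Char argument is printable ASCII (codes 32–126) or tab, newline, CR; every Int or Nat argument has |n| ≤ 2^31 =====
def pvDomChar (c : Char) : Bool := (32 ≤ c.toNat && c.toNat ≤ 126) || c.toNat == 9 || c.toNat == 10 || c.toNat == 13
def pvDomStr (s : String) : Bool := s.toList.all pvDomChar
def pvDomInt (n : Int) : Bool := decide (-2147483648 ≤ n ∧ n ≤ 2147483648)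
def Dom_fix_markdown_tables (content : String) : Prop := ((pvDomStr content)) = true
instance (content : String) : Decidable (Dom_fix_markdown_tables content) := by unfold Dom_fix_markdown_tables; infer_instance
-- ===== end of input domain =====

-- B replaces A's in-table flag / buffer state machine by an itertools.groupby block traversal (objective: alternative decomposition, same cost).

-- ===== PORT A =====
-- 'if fixed_lines and fixed_lines[-1].strip() != "": fixed_lines.append("")' (identical text in A and in B)
def pvPadBefore (fixed : List String) : List String :=
  match PySem.List.pyGet? fixed (-1) with
  | some l => if PySem.Str.strip l ≠ "" then fixed ++ [""] else fixed
  | none => fixed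

-- the body of A's 'for i, line in enumerate(lines)' loop, state = (fixed_lines, table_buffer, in_table)
def pvStepA (st : List String × List String × Bool) (line : String) : List String × List String × Bool :=
  let stripped := PySem.Str.strip line
  let isTable := PySem.Str.startswith stripped "|" && PySem.Str.isIn "|" stripped
  if isTable then (st.1, st.2.1 ++ [line], true)
  else if st.2.2 then
    let f2 := pvPadBefore st.1 ++ st.2.1
    let f3 := if stripped ≠ "" then f2 ++ [""] else f2
    (f3 ++ [line], [], false)
  else (st.1 ++ [line], st.2.1, st.2.2)

def fix_markdown_tables (content : String) : String :=
  let lines := (PySem.Str.split? content "\n").getD []   -- content.split('\n'); the separator is non-empty, so split? is `some`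
  let st := lines.foldl pvStepA ([], [], false)
  -- 'if table_buffer:' final flush
  let fixed := match st.2.1 with
    | [] => st.1
    | _ => pvPadBefore st.1 ++ st.2.1
  PySem.Str.join "\n" fixed

-- ===== PORT B =====
-- key=lambda l: l.strip().startswith('|')
def pvKey (line : String) : Bool := PySem.Str.startswith (PySem.Str.strip line) "|"

-- itertools.groupby(lines, key=pvKey), each group materialised by list(grp)
def pvRuns (lines : List String) : List (Bool × List String) :=
  match lines with
  | [] => []
  | l :: ls =>
    (pvKey l, l :: ls.takeWhile (fun x => pvKey x == pvKey l)) ::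
      pvRuns (ls.dropWhile (fun x => pvKey x == pvKey l))
termination_by lines.length
decreasing_by simpa using Nat.lt_succ_of_le (List.length_dropWhile_le _ _)

-- B's 'for is_table, grp in groupby(...)' loop over the blocks
def pvLoopB : List (Bool × List String) → List String → Bool → List String
  | [], fixed, _prev => fixed
  | (k, block) :: rest, fixed, prev =>
    let fixed' :=
      if k then pvPadBefore fixed
      else if prev ∧ PySem.Str.strip block.headI ≠ "" then fixed ++ [""] else fixed
    pvLoopB rest (fixed' ++ block) k

def fix_markdown_tables_alt (content : String) : String :=
  PySem.Str.join "\n" (pvLoopB (pvRuns ((PySem.Str.split? content "\n").getD [])) [] false)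

-- ===== PRECONDITION & SPEC =====
def Spec_fix_markdown_tables (content : String) (out : String) : Prop := out = fix_markdown_tables_alt content
instance (content : String) (out : String) : Decidable (Spec_fix_markdown_tables content out) := by unfold Spec_fix_markdown_tables; infer_instance

-- ===== CLAIM (what is proved, stated in full; the proofs are below) =====
def Claim_equal_fix_markdown_tables : Prop := ∀ (content : String), Dom_fix_markdown_tables content → Spec_fix_markdown_tables content (fix_markdown_tables content)

-- ===== LEMMAS AND PROOFS =====

-- A's table test equals B's key: 'stripped.startswith("|")' already forces '"|" in stripped'.
theorem pvKeyA_eq (l : String) :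
    (PySem.Str.startswith (PySem.Str.strip l) "|" && PySem.Str.isIn "|" (PySem.Str.strip l)) = pvKey l := by
  unfold pvKey
  cases h : PySem.Str.startswith (PySem.Str.strip l) "|" with
  | false => simp
  | true =>
    simp only [Bool.true_and]
    rw [PySem.Str.isIn_iff_infix]
    rw [PySem.Str.startswith_eq] at h
    exact List.IsPrefix.isInfix ((PySem.Chars.startswith_iff _ _).mp h)

-- A's finishing flush ('if table_buffer: …'), named for the proofs below
def pvFinishA (st : List String × List String × Bool) : List String :=
  match st.2.1 with
  | [] => st.1
  | _ => pvPadBefore st.1 ++ st.2.1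

-- A's loop over a run of table lines only accumulates the buffer
theorem foldl_stepA_table (ts : List String) (h : ∀ t ∈ ts, pvKey t = true) :
    ∀ fixed buf b, List.foldl pvStepA (fixed, buf, b) ts
      = (fixed, buf ++ ts, if ts.isEmpty then b else true) := by
  induction ts with
  | nil => intro fixed buf b; simp
  | cons t ts ih =>
    intro fixed buf b
    have ht : pvKey t = true := h t (by simp)
    have hstep : pvStepA (fixed, buf, b) t = (fixed, buf ++ [t], true) := by
      simp only [pvStepA]; rw [pvKeyA_eq, ht]; simp
    rw [List.foldl_cons, hstep, ih (fun x hx => h x (by simp [hx]))]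
    simp

-- A's loop over non-table lines from a clean state just appends them
theorem foldl_stepA_nontable (ns : List String) (h : ∀ x ∈ ns, pvKey x = false) :
    ∀ fixed, List.foldl pvStepA (fixed, [], false) ns = (fixed ++ ns, [], false) := by
  induction ns with
  | nil => intro fixed; simp
  | cons x ns ih =>
    intro fixed
    have hx : pvKey x = false := h x (by simp)
    have hstep : pvStepA (fixed, [], false) x = (fixed ++ [x], [], false) := by
      simp only [pvStepA]; rw [pvKeyA_eq, hx]; simp
    rw [List.foldl_cons, hstep, ih (fun y hy => h y (by simp [hy]))]
    simp

theorem key_head_dropWhile (p : String → Bool) :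
    ∀ (l : List String) a as, l.dropWhile p = a :: as → p a = false := by
  intro l
  induction l with
  | nil => intro a as h; simp at h
  | cons x xs ih =>
    intro a as h
    by_cases hx : p x = true
    · rw [List.dropWhile_cons_of_pos hx] at h; exact ih a as h
    · rw [List.dropWhile_cons_of_neg hx] at h
      cases h; simpa using hx

theorem key_mem_takeWhile (k : Bool) (ls : List String) (x : String)
    (hx : x ∈ ls.takeWhile (fun y => pvKey y == k)) : pvKey x = k := by
  have := List.mem_takeWhile_imp hx
  simpa using this

-- the main correspondence: A's line loop plus final flush = B's block loop
theorem pvMain : ∀ (n : Nat) (lines : List String), lines.length ≤ n → ∀ fixed,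
    pvFinishA (List.foldl pvStepA (fixed, [], false) lines) = pvLoopB (pvRuns lines) fixed false := by
  intro n
  induction n with
  | zero =>
    intro lines hlen fixed
    cases lines with
    | nil => simp [pvRuns, pvLoopB, pvFinishA]
    | cons l ls => simp at hlen
  | succ n ih =>
    intro lines hlen fixed
    cases lines with
    | nil => simp [pvRuns, pvLoopB, pvFinishA]
    | cons l ls =>
      have hls : ls.length ≤ n := by simpa using hlen
      rw [pvRuns]
      cases hk : pvKey l with
      | false =>
        have hrun : ∀ x ∈ l :: ls.takeWhile (fun y => pvKey y == false), pvKey x = false := by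
          intro x hx
          rcases List.mem_cons.mp hx with h | h
          · rw [h, hk]
          · exact key_mem_takeWhile false ls x h
        have hfold : List.foldl pvStepA (fixed, [], false) (l :: ls)
            = List.foldl pvStepA (fixed ++ (l :: ls.takeWhile (fun y => pvKey y == false)), [], false)
                (ls.dropWhile (fun y => pvKey y == false)) := by
          conv_lhs => rw [show l :: ls
              = (l :: ls.takeWhile (fun y => pvKey y == false)) ++ ls.dropWhile (fun y => pvKey y == false) by
            simp [List.takeWhile_append_dropWhile]]
          rw [List.foldl_append, foldl_stepA_nontable _ hrun]
        rw [hfold, ih _ (le_trans (List.length_dropWhile_le _ _) hls)]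
        simp [pvLoopB]
      | true =>
        have hrun : ∀ x ∈ l :: ls.takeWhile (fun y => pvKey y == true), pvKey x = true := by
          intro x hx
          rcases List.mem_cons.mp hx with h | h
          · rw [h, hk]
          · exact key_mem_takeWhile true ls x h
        have hfold : List.foldl pvStepA (fixed, [], false) (l :: ls)
            = List.foldl pvStepA (fixed, l :: ls.takeWhile (fun y => pvKey y == true), true)
                (ls.dropWhile (fun y => pvKey y == true)) := by
          conv_lhs => rw [show l :: ls
              = (l :: ls.takeWhile (fun y => pvKey y == true)) ++ ls.dropWhile (fun y => pvKey y == true) by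
            simp [List.takeWhile_append_dropWhile]]
          rw [List.foldl_append, foldl_stepA_table _ hrun]
          simp
        rw [hfold]
        cases hdw : ls.dropWhile (fun y => pvKey y == true) with
        | nil =>
          -- the table runs to the end of the file: only the pad-before rule applies
          simp [pvFinishA, pvRuns, pvLoopB]
        | cons r rs =>
          have hkr : pvKey r = false := by
            have h := key_head_dropWhile (fun y => pvKey y == true) ls r rs hdw
            simpa using h
          rw [pvRuns]
          simp only [hkr]
          have hrun2 : ∀ x ∈ rs.takeWhile (fun y => pvKey y == false), pvKey x = false :=
            fun x hx => key_mem_takeWhile false rs x hx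
          -- A's step on r flushes the buffered table
          have hstepr : pvStepA (fixed, l :: ls.takeWhile (fun y => pvKey y == true), true) r
              = ((if PySem.Str.strip r ≠ ""
                    then (pvPadBefore fixed ++ (l :: ls.takeWhile (fun y => pvKey y == true))) ++ [""]
                    else pvPadBefore fixed ++ (l :: ls.takeWhile (fun y => pvKey y == true))) ++ [r],
                  [], false) := by
            simp only [pvStepA]; rw [pvKeyA_eq, hkr]; simp
          have h2 : rs.length + 1 ≤ ls.length := by
            have := List.length_dropWhile_le (fun y => pvKey y == true) ls
            rw [hdw] at this; simpa using this
          have hlen3 : (rs.dropWhile (fun y => pvKey y == false)).length ≤ n := by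
            have h1 := List.length_dropWhile_le (fun y => pvKey y == false) rs
            omega
          conv_lhs => rw [show r :: rs
              = (r :: rs.takeWhile (fun y => pvKey y == false)) ++ rs.dropWhile (fun y => pvKey y == false) by
            simp [List.takeWhile_append_dropWhile]]
          rw [List.foldl_append, List.foldl_cons, hstepr, foldl_stepA_nontable _ hrun2,
            ih _ hlen3]
          -- B's two block steps accumulate the same list
          simp only [pvLoopB, List.headI, if_pos]
          by_cases hs : PySem.Str.strip r = ""
          · simp [hs, List.append_assoc]
          · simp [hs, List.append_assoc]

-- ===== VERDICT (by name: the statement is the Claim_ definition above) =====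
theorem fix_markdown_tables_spec : Claim_equal_fix_markdown_tables := by
  intro content _
  unfold Spec_fix_markdown_tables fix_markdown_tables fix_markdown_tables_alt
  have h := pvMain ((PySem.Str.split? content "\n").getD []).length
    ((PySem.Str.split? content "\n").getD []) le_rfl []
  simp only [pvFinishA] at h
  rw [← h]
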